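-- pv_equiv track=rewrite | github.com/zenml-io/zenml | src/zenml/integrations/huggingface/step_operators/huggingface_jobs_step_operator.py | split_environment
-- ===== SOURCE A (Python) =====
-- from typing import (
--     TYPE_CHECKING,
--     Any,
--     Dict,
--     List,
--     Optional,
--     Tuple,
--     Type,
--     cast,
-- )
--
-- _HF_TOKEN_ENV_KEYS = ("HF_TOKEN", "HUGGING_FACE_HUB_TOKEN")
--
-- def split_environment(
--     environment: Dict[str, str],
--     pass_as_secrets: bool,
-- ) -> Tuple[Dict[str, str], Dict[str, str]]:
--     """Split environment variables into plain env and HF encrypted secrets.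
--
--     HF token keys are always stripped from both dicts to prevent
--     accidental leakage. The step operator injects the resolved token
--     separately as an encrypted secret.
--
--     Args:
--         environment: The full environment dict from ZenML.
--         pass_as_secrets: Whether to route vars through HF secrets.
--
--     Returns:
--         A tuple of (plain_env, secrets), with token keys removed.
--     """
--     if pass_as_secrets:
--         plain_env: Dict[str, str] = {}
--         secrets = dict(environment)
--     else:
--         plain_env = dict(environment)
--         secrets = {}
--
--     # Always strip token keys — the operator injects the canonical
--     # token into secrets separately.
--     for key in _HF_TOKEN_ENV_KEYS:
--         plain_env.pop(key, None)
--         secrets.pop(key, None)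
--
--     return plain_env, secrets
-- ===== SOURCE B (Python) =====
-- _HF_TOKEN_ENV_KEYS = ("HF_TOKEN", "HUGGING_FACE_HUB_TOKEN")
--
--
-- def split_environment(environment, pass_as_secrets):
--     # Single pass with accumulators: route each entry to its destination side
--     # as it is visited (dropping token keys); never copies the whole dict.
--     plain, secrets = {}, {}
--     for k, v in environment.items():
--         if k in _HF_TOKEN_ENV_KEYS:
--             continue
--         if pass_as_secrets:
--             secrets[k] = v
--         else:
--             plain[k] = v
--     return plain, secrets
-- ===== Notes on version B (the rewrite author's own statement) =====
-- stated objective: alternative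
-- what changed: A works in staged passes (copy the whole environment into one side, then pop the two token keys from both sides); B never copies: one loop over the items routes each entry into the secret or plain accumulator per item, skipping token keys as it goes.
import Mathlib
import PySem

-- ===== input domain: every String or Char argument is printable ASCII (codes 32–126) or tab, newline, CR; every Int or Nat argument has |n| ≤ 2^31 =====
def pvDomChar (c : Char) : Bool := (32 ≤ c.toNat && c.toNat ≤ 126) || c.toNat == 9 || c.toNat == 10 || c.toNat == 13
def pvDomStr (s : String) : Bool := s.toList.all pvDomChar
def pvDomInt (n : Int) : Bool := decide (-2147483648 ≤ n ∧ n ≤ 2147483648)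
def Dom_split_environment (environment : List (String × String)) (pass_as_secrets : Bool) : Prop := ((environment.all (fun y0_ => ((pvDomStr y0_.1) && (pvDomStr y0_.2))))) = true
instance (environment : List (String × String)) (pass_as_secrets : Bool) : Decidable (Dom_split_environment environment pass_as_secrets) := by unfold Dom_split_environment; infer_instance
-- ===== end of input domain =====

-- B replaces A's staged copy-whole-dict-then-pop-token-keys with one loop that routes
-- each entry into the secret or plain accumulator as it is visited (objective: alternative
-- decomposition, same cost).

-- ===== PORT A =====
-- _HF_TOKEN_ENV_KEYS = ("HF_TOKEN", "HUGGING_FACE_HUB_TOKEN")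
def hfTokenEnvKeys : List String := ["HF_TOKEN", "HUGGING_FACE_HUB_TOKEN"]

def split_environment (environment : List (String × String)) (pass_as_secrets : Bool) : (List (String × String)) × (List (String × String)) :=
  -- if pass_as_secrets: plain_env = {}; secrets = dict(environment)  else the other way round
  let st : PySem.Dict String String × PySem.Dict String String :=
    if pass_as_secrets then (PySem.Dict.empty, PySem.Dict.mk environment)
    else (PySem.Dict.mk environment, PySem.Dict.empty)
  -- for key in _HF_TOKEN_ENV_KEYS: plain_env.pop(key, None); secrets.pop(key, None)
  let st := hfTokenEnvKeys.foldl
    (fun (st : PySem.Dict String String × PySem.Dict String String) key =>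
      (st.1.erase key, st.2.erase key)) st
  (st.1.items, st.2.items)

-- ===== PORT B =====
-- the body of Source B's for-loop: route one (k, v) into the plain or secret accumulator
def splitEnvStep (pass_as_secrets : Bool)
    (st : PySem.Dict String String × PySem.Dict String String) (kv : String × String) :
    PySem.Dict String String × PySem.Dict String String :=
  if kv.1 == "HF_TOKEN" || kv.1 == "HUGGING_FACE_HUB_TOKEN" then st
  else if pass_as_secrets then (st.1, st.2.insert kv.1 kv.2)
  else (st.1.insert kv.1 kv.2, st.2)

def split_environment_alt (environment : List (String × String)) (pass_as_secrets : Bool) : (List (String × String)) × (List (String × String)) :=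
  -- plain, secrets = {}, {}; for k, v in environment.items(): …
  let r := environment.foldl (splitEnvStep pass_as_secrets) (PySem.Dict.empty, PySem.Dict.empty)
  (r.1.items, r.2.items)

-- ===== PRECONDITION & SPEC =====
-- Pre_ says the association list is a valid dict representation (distinct keys): the Python
-- argument is a dict, so duplicate keys cannot occur; nothing A accepts is excluded.
def Pre_split_environment (environment : List (String × String)) (pass_as_secrets : Bool) : Prop :=
  (environment.map Prod.fst).Nodup
instance (environment : List (String × String)) (pass_as_secrets : Bool) : Decidable (Pre_split_environment environment pass_as_secrets) := by unfold Pre_split_environment; infer_instance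

def pvWitness_split_environment : (List (String × String)) × Bool :=
  ([("PATH", "/bin"), ("HF_TOKEN", "x"), ("A", "1")], true)

def Spec_split_environment (environment : List (String × String)) (pass_as_secrets : Bool) (out : (List (String × String)) × (List (String × String))) : Prop := out = split_environment_alt environment pass_as_secrets
instance (environment : List (String × String)) (pass_as_secrets : Bool) (out : (List (String × String)) × (List (String × String))) : Decidable (Spec_split_environment environment pass_as_secrets out) := by unfold Spec_split_environment; infer_instance

-- ===== CLAIM (what is proved, stated in full; the proofs are below) =====
def Claim_equal_split_environment : Prop := ∀ (environment : List (String × String)) (pass_as_secrets : Bool), Dom_split_environment environment pass_as_secrets → Pre_split_environment environment pass_as_secrets → Spec_split_environment environment pass_as_secrets (split_environment environment pass_as_secrets)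

-- ===== LEMMAS AND PROOFS =====

def keepPred (p : String × String) : Bool :=
  !(p.1 == "HF_TOKEN" || p.1 == "HUGGING_FACE_HUB_TOKEN")

theorem split_environment_eq_filter (environment : List (String × String)) (pass_as_secrets : Bool) :
    split_environment environment pass_as_secrets
      = if pass_as_secrets then (([] : List (String × String)), environment.filter keepPred)
        else (environment.filter keepPred, ([] : List (String × String))) := by
  unfold split_environment hfTokenEnvKeys
  cases pass_as_secrets <;>
    simp [PySem.Dict.erase, PySem.Dict.empty, List.filter_filter] <;>
    exact List.filter_congr (by
      intro p _
      simp [keepPred]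
      cases h1 : p.1 == "HF_TOKEN" <;> cases h2 : p.1 == "HUGGING_FACE_HUB_TOKEN" <;> simp_all)

theorem splitEnvLoop_items (pass_as_secrets : Bool) (l : List (String × String))
    (p s : PySem.Dict String String)
    (hnd : (l.map Prod.fst).Nodup)
    (hp : ∀ x ∈ l, p.contains x.1 = false)
    (hs : ∀ x ∈ l, s.contains x.1 = false) :
    (l.foldl (splitEnvStep pass_as_secrets) (p, s)).1.items
        = p.items ++ (if pass_as_secrets then [] else l.filter keepPred) ∧
    (l.foldl (splitEnvStep pass_as_secrets) (p, s)).2.items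
        = s.items ++ (if pass_as_secrets then l.filter keepPred else []) := by
  induction l generalizing p s with
  | nil => simp
  | cons hd tl ih =>
    obtain ⟨k, v⟩ := hd
    simp only [List.map_cons, List.nodup_cons, List.mem_map] at hnd
    have hk : k ∉ tl.map Prod.fst := by
      intro h; exact hnd.1 (by simpa using h)
    have hfresh : ∀ x ∈ tl, x.1 ≠ k := by
      intro x hx he
      exact hk (by simpa [he] using List.mem_map_of_mem (f := Prod.fst) hx)
    simp only [List.foldl_cons, splitEnvStep, List.filter]
    cases hkeep : (k == "HF_TOKEN" || k == "HUGGING_FACE_HUB_TOKEN")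
    · -- kept entry: inserted into one side
      have hins : ∀ (d : PySem.Dict String String),
          (∀ x ∈ (k, v) :: tl, d.contains x.1 = false) →
          ∀ x ∈ tl, (d.insert k v).contains x.1 = false := by
        intro d hd x hx
        rw [PySem.Dict.contains_insert]
        have h1 : (x.1 == k) = false := by simpa using hfresh x hx
        simp [h1, hd x (List.mem_cons_of_mem _ hx)]
      cases pass_as_secrets
      · have := ih (p.insert k v) s hnd.2 (hins p hp)
          (fun x hx => hs x (List.mem_cons_of_mem _ hx))
        simp only [hkeep, Bool.false_eq_true, if_false, keepPred, if_true]
        have hc := hp (k, v) List.mem_cons_self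
        simp [this.1, this.2, PySem.Dict.items_insert, hc]
      · have := ih p (s.insert k v) hnd.2
          (fun x hx => hp x (List.mem_cons_of_mem _ hx)) (hins s hs)
        simp only [hkeep, Bool.false_eq_true, if_false, keepPred, if_true]
        have hc := hs (k, v) List.mem_cons_self
        simp [this.1, this.2, PySem.Dict.items_insert, hc]
    · -- token key: dropped
      have := ih p s hnd.2
        (fun x hx => hp x (List.mem_cons_of_mem _ hx))
        (fun x hx => hs x (List.mem_cons_of_mem _ hx))
      simp only [hkeep, keepPred, Bool.false_eq_true, if_true, if_false]
      simpa using this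

-- ===== VERDICT (by name: the statement is the Claim_ definition above) =====
theorem split_environment_spec : Claim_equal_split_environment := by
  intro environment pass_as_secrets _ hpre
  unfold Spec_split_environment split_environment_alt
  rw [split_environment_eq_filter]
  have h := splitEnvLoop_items pass_as_secrets environment PySem.Dict.empty PySem.Dict.empty
    hpre (by simp [PySem.Dict.contains_empty]) (by simp [PySem.Dict.contains_empty])
  cases pass_as_secrets <;> simp_all [PySem.Dict.empty]
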